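-- pv_equiv track=rewrite | github.com/justforfreezw-zt1219906902/literature_crawler | app/util/current_protocol_crawl_util.py | filter_resource_by_original_name
-- ===== SOURCE A (Python) =====
-- def filter_resource_by_original_name(resource_all,name_list):
--     filter_resource_list=[]
--     for resource in resource_all:
--         resource_flag = True
--         for name in name_list:
--             if name in resource[1]:
--                 resource_flag=False
--                 break
--         if resource_flag:
--             filter_resource_list.append(resource)
--     return filter_resource_list
-- ===== SOURCE B (Python) =====
-- def filter_resource_by_original_name(resource_all, name_list):
--     # Inverted loop order: one pass per name marks matching resources, then a single
--     # comprehension collects the survivors (instead of scanning all names per resource).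
--     keep = [True] * len(resource_all)
--     for name in name_list:
--         for i, resource in enumerate(resource_all):
--             if keep[i] and name in resource[1]:
--                 keep[i] = False
--     return [r for i, r in enumerate(resource_all) if keep[i]]
-- ===== Notes on version B (the rewrite author's own statement) =====
-- stated objective: alternative
-- what changed: Inverts the loop nesting: instead of scanning the whole name_list per resource with a break, B makes one pass over the resources per name, maintaining a keep-mask, and collects the survivors in a final comprehension.
import Mathlib
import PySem

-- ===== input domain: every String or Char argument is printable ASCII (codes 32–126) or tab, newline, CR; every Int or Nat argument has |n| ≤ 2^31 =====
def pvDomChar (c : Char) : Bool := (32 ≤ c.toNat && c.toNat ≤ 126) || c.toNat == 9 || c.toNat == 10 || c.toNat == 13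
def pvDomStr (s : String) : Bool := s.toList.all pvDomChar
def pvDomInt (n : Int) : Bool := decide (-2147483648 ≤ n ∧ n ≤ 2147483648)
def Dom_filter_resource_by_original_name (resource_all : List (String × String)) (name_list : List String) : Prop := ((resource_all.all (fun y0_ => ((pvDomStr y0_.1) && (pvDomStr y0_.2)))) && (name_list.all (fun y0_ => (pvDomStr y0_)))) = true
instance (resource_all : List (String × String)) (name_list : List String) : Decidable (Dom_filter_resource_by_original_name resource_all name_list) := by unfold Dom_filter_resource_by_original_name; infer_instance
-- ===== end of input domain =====

-- B inverts the loop nesting (one pass over resources per name, with a keep-mask) instead of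
-- scanning all names per resource; equivalence of the two filters is proved on Dom.


-- ===== PORT A =====
-- A's inner loop over name_list with the break: returns the resource_flag
def aFlag (text : String) : List String → Bool
  | [] => true
  | n :: rest => if PySem.Str.isIn n text then false else aFlag text rest

def filter_resource_by_original_name (resource_all : List (String × String)) (name_list : List String) : List (String × String) :=
  resource_all.foldl (fun acc resource => if aFlag resource.2 name_list then acc ++ [resource] else acc) []

-- ===== PORT B =====
-- one pass over (keep, resource) pairs for a single name, clearing keep where the name occurs
def bMark (pairs : List (Bool × (String × String))) (name : String) : List Bool :=
  pairs.map (fun p => p.1 && !(PySem.Str.isIn name p.2.2))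

def filter_resource_by_original_name_alt (resource_all : List (String × String)) (name_list : List String) : List (String × String) :=
  let keep := name_list.foldl (fun keep name => bMark (keep.zip resource_all) name) (resource_all.map (fun _ => true))
  (keep.zip resource_all).filterMap (fun p => if p.1 then some p.2 else none)

-- ===== PRECONDITION & SPEC =====
def Spec_filter_resource_by_original_name (resource_all : List (String × String)) (name_list : List String) (out : List (String × String)) : Prop := out = filter_resource_by_original_name_alt resource_all name_list
instance (resource_all : List (String × String)) (name_list : List String) (out : List (String × String)) : Decidable (Spec_filter_resource_by_original_name resource_all name_list out) := by unfold Spec_filter_resource_by_original_name; infer_instance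

-- ===== CLAIM (what is proved, stated in full; the proofs are below) =====
def Claim_equal_filter_resource_by_original_name : Prop := ∀ (resource_all : List (String × String)) (name_list : List String), Dom_filter_resource_by_original_name resource_all name_list → Spec_filter_resource_by_original_name resource_all name_list (filter_resource_by_original_name resource_all name_list)

-- ===== LEMMAS AND PROOFS =====

-- A's flag is "no name occurs in the text"
theorem aFlag_eq_all (text : String) (nl : List String) :
    aFlag text nl = nl.all (fun n => !(PySem.Str.isIn n text)) := by
  induction nl with
  | nil => rfl
  | cons n rest ih =>
    simp only [aFlag, List.all_cons, ih]
    by_cases h : PySem.Str.isIn n text = true <;> simp [h]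

theorem zip_map_self {α β : Type} (P : α → β) (l : List α) :
    (l.map P).zip l = l.map (fun r => (P r, r)) := by
  induction l with
  | nil => rfl
  | cons x xs ih => simp [ih]

-- invariant of B's fold: the keep-mask stays a map over resource_all
theorem bFold_eq (ra : List (String × String)) (nl : List String) (P : (String × String) → Bool) :
    nl.foldl (fun keep name => bMark (keep.zip ra) name) (ra.map P)
      = ra.map (fun r => P r && nl.all (fun n => !(PySem.Str.isIn n r.2))) := by
  induction nl generalizing P with
  | nil => simp
  | cons n rest ih =>
    rw [List.foldl_cons,
      show bMark ((ra.map P).zip ra) n = ra.map (fun r => P r && !(PySem.Str.isIn n r.2)) by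
        simp [bMark, zip_map_self, List.map_map, Function.comp_def],
      ih]
    simp [Bool.and_assoc]

theorem filterMap_zip_map {α : Type} (Q : α → Bool) (l : List α) :
    ((l.map Q).zip l).filterMap (fun p => if p.1 then some p.2 else none) = l.filter Q := by
  rw [zip_map_self]
  induction l with
  | nil => rfl
  | cons x xs ih =>
    by_cases h : Q x = true <;> simp [h, ih]

theorem foldl_append_flag (ra : List (String × String)) (nl : List String) (acc : List (String × String)) :
    ra.foldl (fun acc resource => if aFlag resource.2 nl then acc ++ [resource] else acc) acc
      = acc ++ ra.filter (fun r => aFlag r.2 nl) := by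
  induction ra generalizing acc with
  | nil => simp
  | cons r rs ih =>
    by_cases h : aFlag r.2 nl = true <;> simp [h, ih]

-- ===== VERDICT (by name: the statement is the Claim_ definition above) =====
theorem filter_resource_by_original_name_spec : Claim_equal_filter_resource_by_original_name := by
  intro ra nl _
  show filter_resource_by_original_name ra nl = filter_resource_by_original_name_alt ra nl
  unfold filter_resource_by_original_name filter_resource_by_original_name_alt
  rw [foldl_append_flag, bFold_eq, filterMap_zip_map]
  simp [aFlag_eq_all]
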